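-- pv_equiv track=rewrite | github.com/ProntoPublishing/pronto-worker-1-manuscript | lib/rules/classification.py | _last_index_with_role
-- ===== SOURCE A (Python) =====
-- from typing import Dict, List, Any, Optional, Set
--
-- def _last_index_with_role(
--     blocks: List[Dict[str, Any]],
--     roles: Set[str],
-- ) -> Optional[int]:
--     last = None
--     for i, b in enumerate(blocks):
--         if b.get("role") in roles:
--             last = i
--     return last
-- ===== SOURCE B (Python) =====
-- from typing import Dict, List, Any, Optional, Set
--
--
-- def _last_index_with_role(
--     blocks: List[Dict[str, Any]],
--     roles: Set[str],
-- ) -> Optional[int]: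
--     for i in range(len(blocks) - 1, -1, -1):
--         if blocks[i].get("role") in roles:
--             return i
--     return None
-- ===== Notes on version B (the rewrite author's own statement) =====
-- stated objective: simpler
-- what changed: Replaces the forward full scan that keeps a 'last' accumulator with a backward scan that returns the first (i.e. last overall) matching index immediately and maintains no state.
import Mathlib
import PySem

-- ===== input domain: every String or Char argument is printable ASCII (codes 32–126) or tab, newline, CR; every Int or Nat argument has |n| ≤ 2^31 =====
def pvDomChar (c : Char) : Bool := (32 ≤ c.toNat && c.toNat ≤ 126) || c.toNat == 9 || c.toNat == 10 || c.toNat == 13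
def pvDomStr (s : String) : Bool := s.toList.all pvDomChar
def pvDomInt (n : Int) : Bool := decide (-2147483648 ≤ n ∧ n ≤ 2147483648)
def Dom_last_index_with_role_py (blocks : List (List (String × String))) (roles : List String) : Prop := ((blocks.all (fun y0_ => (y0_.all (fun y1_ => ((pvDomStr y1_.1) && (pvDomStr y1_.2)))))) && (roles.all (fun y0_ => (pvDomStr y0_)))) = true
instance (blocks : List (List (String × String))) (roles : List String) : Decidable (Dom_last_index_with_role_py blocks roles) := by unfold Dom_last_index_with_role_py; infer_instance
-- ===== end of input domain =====

-- B replaces the forward scan with a "last" accumulator by a backward short-circuiting scan (simpler decomposition, same O(n)).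


-- ===== PORT A =====
-- b.get("role") in roles : None (missing key) is never in a set of strings
def pvHit (b : List (String × String)) (roles : List String) : Bool :=
  match PySem.Dict.get? (PySem.Dict.mk b) "role" with
  | some r => roles.contains r
  | none => false

def last_index_with_role_py (blocks : List (List (String × String))) (roles : List String) : Option Int :=
  (PySem.List.enumerate blocks).foldl
    (fun last p => if pvHit p.2 roles then some p.1 else last) none

-- ===== PORT B =====
-- for i in range(len(blocks)-1, -1, -1): return i on first hit; else None.
-- pvBGo blocks roles n scans indices n-1, n-2, …, 0 (index always in range).
def pvBGo (blocks : List (List (String × String))) (roles : List String) : Nat → Option Int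
  | 0 => none
  | Nat.succ i => if pvHit (blocks.getD i []) roles then some (i : Int) else pvBGo blocks roles i

def last_index_with_role_py_alt (blocks : List (List (String × String))) (roles : List String) : Option Int :=
  pvBGo blocks roles blocks.length

-- ===== PRECONDITION & SPEC =====
def Spec_last_index_with_role_py (blocks : List (List (String × String))) (roles : List String) (out : Option Int) : Prop := out = last_index_with_role_py_alt blocks roles
instance (blocks : List (List (String × String))) (roles : List String) (out : Option Int) : Decidable (Spec_last_index_with_role_py blocks roles out) := by unfold Spec_last_index_with_role_py; infer_instance

-- ===== CLAIM (what is proved, stated in full; the proofs are below) =====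
def Claim_equal_last_index_with_role_py : Prop := ∀ (blocks : List (List (String × String))) (roles : List String), Dom_last_index_with_role_py blocks roles → Spec_last_index_with_role_py blocks roles (last_index_with_role_py blocks roles)

-- ===== LEMMAS AND PROOFS =====

-- ===== VERDICT (by name: the statement is the Claim_ definition above) =====
theorem pvBGo_append (blocks : List (List (String × String))) (b : List (String × String))
    (roles : List String) (n : Nat) (hn : n ≤ blocks.length) :
    pvBGo (blocks ++ [b]) roles n = pvBGo blocks roles n := by
  induction n with
  | zero => rfl
  | succ i ih =>
    have hi : i < blocks.length := hn
    simp only [pvBGo, List.getD_append _ _ _ _ hi, ih (Nat.le_of_lt hi)]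

theorem pv_main (blocks : List (List (String × String))) (roles : List String) :
    last_index_with_role_py blocks roles = last_index_with_role_py_alt blocks roles := by
  induction blocks using List.reverseRecOn with
  | nil => rfl
  | append_singleton l b ih =>
    unfold last_index_with_role_py last_index_with_role_py_alt at *
    rw [PySem.List.enumerate_append, List.foldl_append]
    simp only [PySem.List.enumerate_cons, PySem.List.enumerate_nil, List.foldl_cons, List.foldl_nil,
      List.length_append, List.length_singleton]
    rw [show l.length + 1 = Nat.succ l.length from rfl]
    have hb : (l ++ [b]).getD l.length [] = b := by
      simp [List.getD]
    simp only [pvBGo, hb]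
    by_cases h : pvHit b roles
    · simp [h]
    · simp [h, ih, pvBGo_append l b roles l.length (Nat.le_refl _)]

theorem last_index_with_role_py_spec : Claim_equal_last_index_with_role_py := by
  intro blocks roles _
  unfold Spec_last_index_with_role_py
  exact pv_main blocks roles
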